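-- pv_equiv track=rewrite | github.com/ReallyWarm/oods-works | Python2/twotwo.py | weirdSubtract
-- ===== SOURCE A (Python) =====
-- def weirdSubtract(n,k):
--     for i in range(k):
--         if n > 0:
--             if n % 10 == 0:
--                 n = int(str(n)[:-1])
--             else:
--                 n -= 1
--
--     return n
-- ===== SOURCE B (Python) =====
-- def weirdSubtract(n, k):
--     # Batched: one step per decimal-digit event instead of k single steps.
--     while k > 0 and n > 0:
--         if n % 10 == 0:
--             n = int(str(n)[:-1])
--             k -= 1
--         else:
--             t = min(k, n % 10)
--             n -= t
--             k -= t
--     return n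
-- ===== Notes on version B (the rewrite author's own statement) =====
-- stated objective: faster
-- what changed: Instead of looping k times subtracting 1 per step, B batches all unit-decrements until the next trailing zero into one arithmetic step (t = min(k, n % 10)), so the loop runs once per digit event, not once per k.
import Mathlib
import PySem

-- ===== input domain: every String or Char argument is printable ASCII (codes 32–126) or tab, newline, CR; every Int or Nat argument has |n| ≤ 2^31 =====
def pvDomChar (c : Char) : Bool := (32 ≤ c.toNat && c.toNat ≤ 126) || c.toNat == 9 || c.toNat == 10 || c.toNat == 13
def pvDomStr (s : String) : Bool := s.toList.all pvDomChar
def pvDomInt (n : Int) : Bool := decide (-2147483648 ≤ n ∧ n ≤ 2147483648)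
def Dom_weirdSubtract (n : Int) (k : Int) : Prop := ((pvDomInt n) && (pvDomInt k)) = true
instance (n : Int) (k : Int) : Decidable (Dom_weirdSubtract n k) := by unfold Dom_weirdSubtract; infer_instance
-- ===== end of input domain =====

-- B batches the unit-decrements between trailing-zero events into one arithmetic step
-- (objective: faster, O(digit events) loop instead of O(k) loop); same return value everywhere.

-- ===== PORT A =====
-- int(str(n)[:-1]) — exact for the states both programs reach (n > 0 with n % 10 == 0,
-- hence n ≥ 10 and the sliced string is a nonempty digit string); .getD 0 is never hit there.
def pvStrDrop (n : Int) : Int :=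
  (PySem.Int.ofChars? (PySem.List.slice (PySem.Int.toChars n) none (some (-1)))).getD 0

-- loop body of A (one iteration of `for i in range(k)`)
def pvStep (m : Int) : Int :=
  if m > 0 then (if PySem.Int.mod m 10 == 0 then pvStrDrop m else m - 1) else m

def weirdSubtract (n : Int) (k : Int) : Int :=
  (PySem.List.pyRange 0 k 1).foldl (fun m _ => pvStep m) n

-- ===== PORT B =====
def weirdSubtract_alt (n : Int) (k : Int) : Int :=
  if _h : 0 < k ∧ 0 < n then
    if hr : PySem.Int.mod n 10 == 0 then
      weirdSubtract_alt (pvStrDrop n) (k - 1)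
    else
      let t := min k (PySem.Int.mod n 10)
      weirdSubtract_alt (n - t) (k - t)
  else n
termination_by k.toNat
decreasing_by
  · omega
  · have h0 : PySem.Int.mod n 10 = n % 10 := PySem.Int.mod_eq_emod_of_pos (by omega)
    simp only [beq_iff_eq] at hr
    rw [h0] at hr ⊢
    have : 0 ≤ n % 10 := Int.emod_nonneg n (by omega)
    omega

-- ===== PRECONDITION & SPEC =====
def Spec_weirdSubtract (n : Int) (k : Int) (out : Int) : Prop := out = weirdSubtract_alt n k
instance (n : Int) (k : Int) (out : Int) : Decidable (Spec_weirdSubtract n k out) := by unfold Spec_weirdSubtract; infer_instance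

-- ===== CLAIM (what is proved, stated in full; the proofs are below) =====
def Claim_equal_weirdSubtract : Prop := ∀ (n : Int) (k : Int), Dom_weirdSubtract n k → Spec_weirdSubtract n k (weirdSubtract n k)

-- ===== LEMMAS AND PROOFS =====

lemma pvStep_nonpos {m : Int} (h : ¬ 0 < m) : pvStep m = m := by
  simp [pvStep, h]

lemma pyRange_len (k : Int) : (PySem.List.pyRange 0 k 1).length = k.toNat := by
  simp [PySem.List.pyRange]
  omega

lemma weirdSubtract_eq_iterate (n k : Int) :
    weirdSubtract n k = pvStep^[k.toNat] n := by
  rw [weirdSubtract, List.foldl_const, pyRange_len]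

-- iterating the single-step loop body j times while the units digit stays nonzero
-- just subtracts j
lemma iterate_sub (j : Nat) : ∀ (n : Int), 0 < n → (j : Int) ≤ PySem.Int.mod n 10 →
    pvStep^[j] n = n - j := by
  induction j with
  | zero => intro n _ _; simp
  | succ j ih =>
    intro n hn hj
    have hmod : PySem.Int.mod n 10 = n % 10 := PySem.Int.mod_eq_emod_of_pos (by omega)
    rw [hmod] at hj
    rw [Function.iterate_succ_apply', ih n hn (by omega)]
    have hnj : 0 < n - j := by omega
    have hmj : (n - (j : Int)) % 10 = n % 10 - j := by omega
    have : PySem.Int.mod (n - j) 10 = n % 10 - j := by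
      rw [PySem.Int.mod_eq_emod_of_pos (by omega), hmj]
    simp only [pvStep, this]
    have hne : ¬ ((n % 10 - (j : Int)) == 0) = true := by
      simp only [beq_iff_eq]; omega
    rw [if_pos hnj, if_neg hne]
    push_cast
    ring

lemma iterate_eq_alt (m : Nat) : ∀ (n k : Int), k.toNat = m →
    pvStep^[m] n = weirdSubtract_alt n k := by
  induction m using Nat.strong_induction_on with
  | _ m ih =>
    intro n k hk
    rw [weirdSubtract_alt.eq_def]
    by_cases hkpos : 0 < k
    · by_cases hn : 0 < n
      · rw [dif_pos ⟨hkpos, hn⟩]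
        have hmod : PySem.Int.mod n 10 = n % 10 := PySem.Int.mod_eq_emod_of_pos (by omega)
        have hmn : 0 ≤ n % 10 ∧ n % 10 < 10 := ⟨Int.emod_nonneg n (by omega), Int.emod_lt_of_pos n (by omega)⟩
        by_cases hr : PySem.Int.mod n 10 = 0
        · rw [dif_pos (by simpa using hr)]
          obtain ⟨m', rfl⟩ : ∃ m', m = m' + 1 := ⟨m - 1, by omega⟩
          rw [Function.iterate_succ_apply]
          have hstep : pvStep n = pvStrDrop n := by
            unfold pvStep
            rw [if_pos hn, if_pos (show (PySem.Int.mod n 10 == 0) = true by rw [beq_iff_eq]; exact hr)]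
          rw [hstep]
          exact ih m' (by omega) _ (k - 1) (by omega)
        · rw [dif_neg (by simpa using hr)]
          rw [hmod] at hr
          set t : Int := min k (PySem.Int.mod n 10) with ht
          have htv : t = min k (n % 10) := by rw [ht, hmod]
          have ht1 : 1 ≤ t ∧ t ≤ k ∧ t ≤ n % 10 := by
            constructor
            · rw [htv]; omega
            · constructor <;> [rw [htv]; rw [htv]] <;> omega
          obtain ⟨tn, htn⟩ : ∃ tn : Nat, (tn : Int) = t := ⟨t.toNat, by omega⟩
          have hsplit : m = (m - tn) + tn := by omega
          rw [hsplit, Function.iterate_add_apply]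
          rw [iterate_sub tn n hn (by rw [hmod]; omega)]
          rw [htn]
          exact ih (m - tn) (by omega) _ (k - t) (by omega)
      · rw [dif_neg (by omega)]
        exact Function.iterate_fixed (pvStep_nonpos hn) m
    · rw [dif_neg (by omega)]
      have : m = 0 := by omega
      rw [this]; rfl

-- ===== VERDICT (by name: the statement is the Claim_ definition above) =====
theorem weirdSubtract_spec : Claim_equal_weirdSubtract := by
  intro n k _
  unfold Spec_weirdSubtract
  rw [weirdSubtract_eq_iterate]
  exact iterate_eq_alt k.toNat n k rfl
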